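-- pv_equiv track=rewrite | github.com/dvnber10/Chatbot_pln | src/Utils/PLN_utils.py | obtener_ultimo_modelo
-- ===== SOURCE A (Python) =====
-- CATALOGO = {
--     "dell": {
--         "Dell Inspiron 15": {"precio": 800, "ram": "16GB", "storage": "512GB SSD"},
--         "Dell XPS 13": {"precio": 1200, "ram": "16GB", "storage": "1TB SSD", "extra": "pantalla 4K"},
--         "Dell Alienware M15": {"precio": 1800, "ram": "32GB", "storage": "1TB SSD", "extra": "RTX 3070"}
--     },
--     "hp": {
--         "HP Pavilion": {"precio": 600, "ram": "8GB", "storage": "1TB HDD"},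
--         "HP Envy 13": {"precio": 950, "ram": "16GB", "storage": "512GB SSD", "extra": "pantalla táctil"},
--         "HP Omen 16": {"precio": 1500, "ram": "32GB", "storage": "1TB SSD", "extra": "RTX 3060"}
--     },
--     "lenovo": {
--         "Lenovo ThinkPad X1 Carbon": {"precio": 1200, "ram": "32GB", "storage": "1TB SSD"},
--         "Lenovo IdeaPad 5": {"precio": 700, "ram": "8GB", "storage": "512GB SSD"},
--         "Lenovo Legion 5 Pro": {"precio": 1600, "ram": "32GB", "storage": "1TB SSD", "extra": "RTX 3070"}
--     }
-- }
--
-- def obtener_ultimo_modelo(historial):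
--     """
--     Busca el último modelo mencionado o confirmado en el historial.
--     Devuelve el nombre exacto del modelo si lo encuentra.
--     """
--     for msg in reversed(historial):
--         # Buscar texto en 'content' o 'Modelo'
--         texto = msg.get("content") or msg.get("Modelo") or ""
--         texto_lower = texto.lower()
--         for marca, productos in CATALOGO.items():
--             for nombre in productos.keys():
--                 nombre_lower = nombre.lower()
--                 # Coincidencia exacta o al menos dos palabras del modelo
--                 palabras = nombre_lower.split()
--                 if nombre_lower in texto_lower or all(p in texto_lower for p in palabras):
--                     return nombre
--     return None
-- ===== SOURCE B (Python) =====
-- CATALOGO = {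
--     "dell": {
--         "Dell Inspiron 15": {"precio": 800, "ram": "16GB", "storage": "512GB SSD"},
--         "Dell XPS 13": {"precio": 1200, "ram": "16GB", "storage": "1TB SSD", "extra": "pantalla 4K"},
--         "Dell Alienware M15": {"precio": 1800, "ram": "32GB", "storage": "1TB SSD", "extra": "RTX 3070"}
--     },
--     "hp": {
--         "HP Pavilion": {"precio": 600, "ram": "8GB", "storage": "1TB HDD"},
--         "HP Envy 13": {"precio": 950, "ram": "16GB", "storage": "512GB SSD", "extra": "pantalla táctil"},
--         "HP Omen 16": {"precio": 1500, "ram": "32GB", "storage": "1TB SSD", "extra": "RTX 3060"}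
--     },
--     "lenovo": {
--         "Lenovo ThinkPad X1 Carbon": {"precio": 1200, "ram": "32GB", "storage": "1TB SSD"},
--         "Lenovo IdeaPad 5": {"precio": 700, "ram": "8GB", "storage": "512GB SSD"},
--         "Lenovo Legion 5 Pro": {"precio": 1600, "ram": "32GB", "storage": "1TB SSD", "extra": "RTX 3070"}
--     }
-- }
--
-- # Flat, precomputed: (name, its lowercase words).  Full-substring matching is
-- # dropped because "name in text" implies every word of the name is in the text.
-- _MODELOS = [(nombre, nombre.lower().split())
--             for productos in CATALOGO.values()
--             for nombre in productos]
--
--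
-- def obtener_ultimo_modelo(historial):
--     resultado = None
--     for msg in historial:
--         texto = (msg.get("content") or msg.get("Modelo") or "").lower()
--         for nombre, palabras in _MODELOS:
--             if all(p in texto for p in palabras):
--                 resultado = nombre
--                 break
--     return resultado
-- ===== Notes on version B (the rewrite author's own statement) =====
-- stated objective: simpler
-- what changed: Replaces A's reversed early-return scan over the nested brand->model catalog (with a redundant whole-name substring test) by a single forward fold keeping a 'resultado' accumulator over a flat precomputed (name, lowercase words) list, matching on the words test alone since a whole-name match implies every word matches.
import Mathlib
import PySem

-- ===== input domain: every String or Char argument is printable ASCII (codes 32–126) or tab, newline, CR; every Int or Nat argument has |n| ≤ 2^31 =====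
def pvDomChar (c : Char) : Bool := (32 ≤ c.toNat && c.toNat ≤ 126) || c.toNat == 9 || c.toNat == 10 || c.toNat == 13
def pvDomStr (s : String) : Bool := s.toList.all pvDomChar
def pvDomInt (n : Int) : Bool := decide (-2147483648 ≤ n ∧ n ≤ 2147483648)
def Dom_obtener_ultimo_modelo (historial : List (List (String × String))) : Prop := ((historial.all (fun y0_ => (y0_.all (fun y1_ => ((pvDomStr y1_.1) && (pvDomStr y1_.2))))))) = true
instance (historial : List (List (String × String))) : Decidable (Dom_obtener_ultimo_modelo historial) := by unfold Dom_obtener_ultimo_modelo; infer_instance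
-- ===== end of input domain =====

-- B replaces A's reversed early-return scan over the nested brand→model catalog by a
-- single forward fold with a `resultado` accumulator over a flat precomputed
-- (name, lowercase words) list, dropping the redundant whole-name substring test
-- (a whole-name match implies every word matches); objective: simpler.

-- ===== PORT A =====
-- CATALOGO, keys only as the code uses them: (marca, model names of that brand)
def pvCatalogoA : List (String × List String) :=
  [("dell", ["Dell Inspiron 15", "Dell XPS 13", "Dell Alienware M15"]),
   ("hp", ["HP Pavilion", "HP Envy 13", "HP Omen 16"]),
   ("lenovo", ["Lenovo ThinkPad X1 Carbon", "Lenovo IdeaPad 5", "Lenovo Legion 5 Pro"])]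

-- x or y for strings/None: first truthy (non-empty) value
def pvOrStr (o : Option String) (fb : String) : String :=
  match o with
  | some s => if s = "" then fb else s
  | none => fb

-- msg.get("content") or msg.get("Modelo") or ""
def pvTexto (msg : List (String × String)) : String :=
  pvOrStr ((PySem.Dict.ofList msg).get? "content")
    (pvOrStr ((PySem.Dict.ofList msg).get? "Modelo") "")

-- inner loop: for nombre in productos.keys(): … return nombre
def pvScanNamesA (textoLower : String) : List String → Option String
  | [] => none
  | nombre :: rest =>
      let nombreLower := PySem.Str.lower nombre
      let palabras := PySem.Str.split₀ nombreLower
      if PySem.Str.isIn nombreLower textoLower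
          || palabras.all (fun p => PySem.Str.isIn p textoLower)
      then some nombre
      else pvScanNamesA textoLower rest

-- middle loop: for marca, productos in CATALOGO.items()
def pvScanBrandsA (textoLower : String) : List (String × List String) → Option String
  | [] => none
  | (_, productos) :: rest =>
      match pvScanNamesA textoLower productos with
      | some n => some n
      | none => pvScanBrandsA textoLower rest

-- outer loop: for msg in reversed(historial), with early return
def pvGoA : List (List (String × String)) → Option String
  | [] => none
  | msg :: rest =>
      match pvScanBrandsA (PySem.Str.lower (pvTexto msg)) pvCatalogoA with
      | some n => some n
      | none => pvGoA rest

def obtener_ultimo_modelo (historial : List (List (String × String))) : Option String :=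
  pvGoA historial.reverse

-- ===== PORT B =====
def pvCatalogoB : List (String × List String) :=
  [("dell", ["Dell Inspiron 15", "Dell XPS 13", "Dell Alienware M15"]),
   ("hp", ["HP Pavilion", "HP Envy 13", "HP Omen 16"]),
   ("lenovo", ["Lenovo ThinkPad X1 Carbon", "Lenovo IdeaPad 5", "Lenovo Legion 5 Pro"])]

-- _MODELOS: flat precomputed (nombre, nombre.lower().split())
def pvModelosB : List (String × List String) :=
  pvCatalogoB.flatMap (fun b =>
    b.2.map (fun nombre => (nombre, PySem.Str.split₀ (PySem.Str.lower nombre))))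

def obtener_ultimo_modelo_alt (historial : List (List (String × String))) : Option String :=
  historial.foldl
    (fun resultado msg =>
      let texto := PySem.Str.lower (pvTexto msg)
      match pvModelosB.find? (fun m => m.2.all (fun p => PySem.Str.isIn p texto)) with
      | some m => some m.1
      | none => resultado)
    none

-- ===== PRECONDITION & SPEC =====
def Spec_obtener_ultimo_modelo (historial : List (List (String × String))) (out : Option String) : Prop := out = obtener_ultimo_modelo_alt historial
instance (historial : List (List (String × String))) (out : Option String) : Decidable (Spec_obtener_ultimo_modelo historial out) := by unfold Spec_obtener_ultimo_modelo; infer_instance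

-- ===== CLAIM (what is proved, stated in full; the proofs are below) =====
def Claim_equal_obtener_ultimo_modelo : Prop := ∀ (historial : List (List (String × String))), Dom_obtener_ultimo_modelo historial → Spec_obtener_ultimo_modelo historial (obtener_ultimo_modelo historial)

-- ===== LEMMAS AND PROOFS =====

-- A's disjunction "whole name in text or every word in text" collapses to its
-- second disjunct whenever every word of the name is an infix of the name.
theorem pvCondAbsorb (nl tl : String) (palabras : List String)
    (h : ∀ p ∈ palabras, p.toList <:+: nl.toList) :
    (PySem.Str.isIn nl tl || palabras.all (fun p => PySem.Str.isIn p tl))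
      = palabras.all (fun p => PySem.Str.isIn p tl) := by
  cases hin : PySem.Str.isIn nl tl
  · simp
  · have hnl : nl.toList <:+: tl.toList := (PySem.Str.isIn_iff_infix nl tl).mp hin
    have hall : palabras.all (fun p => PySem.Str.isIn p tl) = true := by
      rw [List.all_eq_true]
      intro p hp
      exact (PySem.Str.isIn_iff_infix p tl).mpr ((h p hp).trans hnl)
    rw [hall, Bool.true_or]

-- per-message: A's nested catalog scan equals B's flat find?
theorem pvScan_eq (tl : String) :
    pvScanBrandsA tl pvCatalogoA
      = (pvModelosB.find? (fun m => m.2.all (fun p => PySem.Str.isIn p tl))).map (·.1) := by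
  have h1 := pvCondAbsorb (PySem.Str.lower "Dell Inspiron 15") tl
    (PySem.Str.split₀ (PySem.Str.lower "Dell Inspiron 15")) (by decide)
  have h2 := pvCondAbsorb (PySem.Str.lower "Dell XPS 13") tl
    (PySem.Str.split₀ (PySem.Str.lower "Dell XPS 13")) (by decide)
  have h3 := pvCondAbsorb (PySem.Str.lower "Dell Alienware M15") tl
    (PySem.Str.split₀ (PySem.Str.lower "Dell Alienware M15")) (by decide)
  have h4 := pvCondAbsorb (PySem.Str.lower "HP Pavilion") tl
    (PySem.Str.split₀ (PySem.Str.lower "HP Pavilion")) (by decide)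
  have h5 := pvCondAbsorb (PySem.Str.lower "HP Envy 13") tl
    (PySem.Str.split₀ (PySem.Str.lower "HP Envy 13")) (by decide)
  have h6 := pvCondAbsorb (PySem.Str.lower "HP Omen 16") tl
    (PySem.Str.split₀ (PySem.Str.lower "HP Omen 16")) (by decide)
  have h7 := pvCondAbsorb (PySem.Str.lower "Lenovo ThinkPad X1 Carbon") tl
    (PySem.Str.split₀ (PySem.Str.lower "Lenovo ThinkPad X1 Carbon")) (by decide)
  have h8 := pvCondAbsorb (PySem.Str.lower "Lenovo IdeaPad 5") tl
    (PySem.Str.split₀ (PySem.Str.lower "Lenovo IdeaPad 5")) (by decide)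
  have h9 := pvCondAbsorb (PySem.Str.lower "Lenovo Legion 5 Pro") tl
    (PySem.Str.split₀ (PySem.Str.lower "Lenovo Legion 5 Pro")) (by decide)
  simp only [pvCatalogoA, pvModelosB, pvCatalogoB, pvScanBrandsA, pvScanNamesA,
    List.flatMap_cons, List.flatMap_nil, List.map_cons, List.map_nil, List.append_nil,
    List.cons_append, List.nil_append, List.find?_cons, h1, h2, h3, h4, h5, h6, h7, h8, h9]
  generalize ((PySem.Str.split₀ (PySem.Str.lower "Dell Inspiron 15")).all fun p => PySem.Str.isIn p tl) = c1 at *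
  generalize ((PySem.Str.split₀ (PySem.Str.lower "Dell XPS 13")).all fun p => PySem.Str.isIn p tl) = c2 at *
  generalize ((PySem.Str.split₀ (PySem.Str.lower "Dell Alienware M15")).all fun p => PySem.Str.isIn p tl) = c3 at *
  generalize ((PySem.Str.split₀ (PySem.Str.lower "HP Pavilion")).all fun p => PySem.Str.isIn p tl) = c4 at *
  generalize ((PySem.Str.split₀ (PySem.Str.lower "HP Envy 13")).all fun p => PySem.Str.isIn p tl) = c5 at *
  generalize ((PySem.Str.split₀ (PySem.Str.lower "HP Omen 16")).all fun p => PySem.Str.isIn p tl) = c6 at *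
  generalize ((PySem.Str.split₀ (PySem.Str.lower "Lenovo ThinkPad X1 Carbon")).all fun p => PySem.Str.isIn p tl) = c7 at *
  generalize ((PySem.Str.split₀ (PySem.Str.lower "Lenovo IdeaPad 5")).all fun p => PySem.Str.isIn p tl) = c8 at *
  generalize ((PySem.Str.split₀ (PySem.Str.lower "Lenovo Legion 5 Pro")).all fun p => PySem.Str.isIn p tl) = c9 at *
  cases c1 <;> cases c2 <;> cases c3 <;> cases c4 <;> cases c5 <;> cases c6 <;>
    cases c7 <;> cases c8 <;> cases c9 <;> rfl

-- forward fold with accumulator = reversed early-exit scan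
theorem pvFold_eq (l : List (List (String × String))) (acc : Option String) :
    l.foldl
      (fun resultado msg =>
        let texto := PySem.Str.lower (pvTexto msg)
        match pvModelosB.find? (fun m => m.2.all (fun p => PySem.Str.isIn p texto)) with
        | some m => some m.1
        | none => resultado)
      acc
      = match pvGoA l.reverse with
        | some n => some n
        | none => acc := by
  induction l generalizing acc with
  | nil => simp [pvGoA]
  | cons msg rest ih =>
      rw [List.foldl_cons, ih]
      have hgo : ∀ (xs : List (List (String × String))) (m : List (String × String)),
          pvGoA (xs ++ [m]) = match pvGoA xs with
            | some n => some n
            | none => pvGoA [m] := by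
        intro xs m
        induction xs with
        | nil => simp [pvGoA]
        | cons x xt iht =>
            simp only [List.cons_append, pvGoA]
            cases pvScanBrandsA (PySem.Str.lower (pvTexto x)) pvCatalogoA with
            | some n => rfl
            | none => exact iht
      rw [List.reverse_cons, hgo]
      simp only [pvGoA, pvScan_eq]
      cases pvGoA rest.reverse with
      | some n => rfl
      | none =>
          cases pvModelosB.find? (fun m =>
              m.2.all (fun p => PySem.Str.isIn p (PySem.Str.lower (pvTexto msg)))) with
          | some m => rfl
          | none => rfl

-- ===== VERDICT (by name: the statement is the Claim_ definition above) =====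
theorem obtener_ultimo_modelo_spec : Claim_equal_obtener_ultimo_modelo := by
  intro historial _
  unfold Spec_obtener_ultimo_modelo obtener_ultimo_modelo obtener_ultimo_modelo_alt
  rw [pvFold_eq]
  cases pvGoA historial.reverse <;> rfl
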